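-- pv_equiv track=rewrite | github.com/ayrat-l/store_revenue | app/lib.py | best_store_of_the_week_with_daily_profit
-- ===== SOURCE A (Python) =====
-- def best_store_of_the_week_with_daily_profit(stores):
--     """
--     >>> best_store_of_the_week_with_daily_profit([[10, 20, 30, 40, 50], [15, 10, 25, 34, 40], [30, 5, 10, 10, 15]])
--     [0]
--     """
--     top1_profit_stores = [] #ТОП1 лучшая продажа магазина
--     for store in stores:
--         top1_profit_stores.append(max(store))
--
--     top1_index_profit = [] #Определяем индекс магазина с лучшей ежедневной выручкой
--     for index, profit in enumerate(top1_profit_stores):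
--         if profit == max(top1_profit_stores):
--             top1_index_profit.append(index)
--     return top1_index_profit
-- ===== SOURCE B (Python) =====
-- def best_store_of_the_week_with_daily_profit(stores):
--     best = None
--     winners = []
--     for index, store in enumerate(stores):
--         store_max = max(store)
--         if best is None or store_max > best:
--             best = store_max
--             winners = [index]
--         elif store_max == best:
--             winners.append(index)
--     return winners
-- ===== Notes on version B (the rewrite author's own statement) =====
-- stated objective: simpler
-- what changed: Replaces A's two phases (build the per-store max list, then rescan it comparing each entry with a recomputed global max) by one pass over enumerate(stores) that keeps a running best value and the list of winning indices, resetting on a strictly larger max and appending on a tie.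
-- outside the precondition, e.g. on best_store_of_the_week_with_daily_profit([[1], []]): A raises ValueError, B raises ValueError
import Mathlib
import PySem

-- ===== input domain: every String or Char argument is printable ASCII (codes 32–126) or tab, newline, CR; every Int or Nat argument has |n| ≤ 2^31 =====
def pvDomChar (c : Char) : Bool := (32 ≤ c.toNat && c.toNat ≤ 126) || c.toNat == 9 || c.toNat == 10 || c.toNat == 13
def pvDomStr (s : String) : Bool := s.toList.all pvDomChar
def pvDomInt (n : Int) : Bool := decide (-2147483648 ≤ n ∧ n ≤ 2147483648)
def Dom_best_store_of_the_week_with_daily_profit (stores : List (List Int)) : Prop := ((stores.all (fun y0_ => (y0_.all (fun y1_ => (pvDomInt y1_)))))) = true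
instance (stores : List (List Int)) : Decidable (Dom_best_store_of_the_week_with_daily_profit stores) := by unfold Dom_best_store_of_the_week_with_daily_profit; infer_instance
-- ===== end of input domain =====

-- B replaces A's two phases (max-list then rescan against a recomputed global max) by one
-- pass keeping a running best value and the winning indices (objective: simpler).

-- ===== PORT A =====
-- Python max(store) raises on an empty store; Pre_ excludes that, here max? ... getD 0.
def best_store_of_the_week_with_daily_profit (stores : List (List Int)) : List Int :=
  let top1 := stores.foldl
    (fun acc store => acc ++ [(PySem.List.max? store (fun y => y)).getD 0]) []
  (PySem.List.enumerate top1 0).foldl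
    (fun acc ip =>
      if ip.2 = (PySem.List.max? top1 (fun y => y)).getD 0 then acc ++ [ip.1] else acc) []

-- ===== PORT B =====
def best_store_of_the_week_with_daily_profit_alt (stores : List (List Int)) : List Int :=
  ((PySem.List.enumerate stores 0).foldl
    (fun (st : Option Int × List Int) is_ =>
      let m := (PySem.List.max? is_.2 (fun y => y)).getD 0
      match st.1 with
      | none => (some m, [is_.1])
      | some b =>
        if m > b then (some m, [is_.1])
        else if m = b then (some b, st.2 ++ [is_.1])
        else st)
    (none, [])).2

-- ===== PRECONDITION & SPEC =====
-- Pre_ excludes inputs containing an empty store: Python's max([]) raises ValueError there (in A and in B).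
def Pre_best_store_of_the_week_with_daily_profit (stores : List (List Int)) : Prop :=
  ∀ s ∈ stores, s ≠ []
instance (stores : List (List Int)) : Decidable (Pre_best_store_of_the_week_with_daily_profit stores) := by
  unfold Pre_best_store_of_the_week_with_daily_profit; infer_instance
def pvWitness_best_store_of_the_week_with_daily_profit : List (List Int) := [[10, 20], [15, 20], [5]]
def Spec_best_store_of_the_week_with_daily_profit (stores : List (List Int)) (out : List Int) : Prop := out = best_store_of_the_week_with_daily_profit_alt stores
instance (stores : List (List Int)) (out : List Int) : Decidable (Spec_best_store_of_the_week_with_daily_profit stores out) := by unfold Spec_best_store_of_the_week_with_daily_profit; infer_instance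

-- ===== CLAIM (what is proved, stated in full; the proofs are below) =====
def Claim_equal_best_store_of_the_week_with_daily_profit : Prop := ∀ (stores : List (List Int)), Dom_best_store_of_the_week_with_daily_profit stores → Pre_best_store_of_the_week_with_daily_profit stores → Spec_best_store_of_the_week_with_daily_profit stores (best_store_of_the_week_with_daily_profit stores)

-- ===== LEMMAS AND PROOFS =====

-- max(store) as both ports compute it
def pvMax (s : List Int) : Int := (PySem.List.max? s (fun y => y)).getD 0

-- A's first loop builds the map
theorem pv_build (stores : List (List Int)) (acc : List Int) :
    stores.foldl (fun acc store => acc ++ [(PySem.List.max? store (fun y => y)).getD 0]) acc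
      = acc ++ stores.map pvMax := by
  induction stores generalizing acc with
  | nil => simp
  | cons s t ih => simp [ih, pvMax]

-- A's second loop is a filter of the winning indices
theorem pv_afold (L : List (Int × Int)) (g : Int) (acc : List Int) :
    L.foldl (fun acc ip => if ip.2 = g then acc ++ [ip.1] else acc) acc
      = acc ++ (L.filter (fun ip => ip.2 = g)).map Prod.fst := by
  induction L generalizing acc with
  | nil => simp
  | cons p t ih =>
    by_cases h : p.2 = g <;> simp [h, ih]

-- B's step on (index, max) pairs
def pvStep (st : Option Int × List Int) (ip : Int × Int) : Option Int × List Int :=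
  match st.1 with
  | none => (some ip.2, [ip.1])
  | some b =>
    if ip.2 > b then (some ip.2, [ip.1])
    else if ip.2 = b then (some b, st.2 ++ [ip.1])
    else st

def pvFm (L : List (Int × Int)) (b : Int) : Int := L.foldl (fun a ip => max a ip.2) b

-- characterisation of B's running fold from a non-empty state
theorem pv_le_fm (t : List (Int × Int)) (b : Int) : b ≤ pvFm t b := by
  have h := (PySem.List.le_foldl_max (t.map Prod.snd) b).1
  simpa only [List.foldl_map, pvFm] using h

-- characterisation of B's running fold from a non-empty state
theorem pv_bfold (L : List (Int × Int)) (b : Int) (idxs : List Int) :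
    L.foldl pvStep (some b, idxs)
      = (some (pvFm L b),
         (if pvFm L b = b then idxs else [])
           ++ (L.filter (fun ip => ip.2 = pvFm L b)).map Prod.fst) := by
  induction L generalizing b idxs with
  | nil => simp [pvFm]
  | cons p t ih =>
    rcases lt_trichotomy b p.2 with hgt | heq | hlt
    · have hb : pvFm (p :: t) b = pvFm t p.2 := by
        simp [pvFm, List.foldl, max_eq_right (le_of_lt hgt)]
      have hstep : pvStep (some b, idxs) p = (some p.2, [p.1]) := by
        simp [pvStep, hgt]
      simp only [List.foldl, hstep, hb]
      rw [ih, List.filter_cons]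
      have hne : pvFm t p.2 ≠ b := by
        have := pv_le_fm t p.2; omega
      rw [if_neg hne]
      by_cases hp : p.2 = pvFm t p.2
      · rw [if_pos hp.symm, if_pos (decide_eq_true hp)]
        simp
      · rw [if_neg (fun h => hp h.symm)]
        simp [hp]
    · have hb : pvFm (p :: t) b = pvFm t b := by
        simp [pvFm, List.foldl, max_eq_left (le_of_eq heq.symm)]
      have hstep : pvStep (some b, idxs) p = (some b, idxs ++ [p.1]) := by
        simp [pvStep, heq]
      simp only [List.foldl, hstep, hb]
      rw [ih, List.filter_cons]
      by_cases hFb : pvFm t b = b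
      · rw [if_pos hFb, if_pos hFb, if_pos (decide_eq_true (show p.2 = pvFm t b by omega))]
        simp [List.append_assoc]
      · have hne : ¬ (p.2 = pvFm t b) := by omega
        rw [if_neg hFb, if_neg hFb]
        simp [hne]
    · have hb : pvFm (p :: t) b = pvFm t b := by
        simp [pvFm, List.foldl, max_eq_left (le_of_lt hlt)]
      have hstep : pvStep (some b, idxs) p = (some b, idxs) := by
        have h1 : ¬ (p.2 > b) := by omega
        have h2 : ¬ (p.2 = b) := by omega
        simp [pvStep, h1, h2]
      simp only [List.foldl, hstep, hb]
      rw [ih, List.filter_cons]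
      have hge : b ≤ pvFm t b := pv_le_fm t b
      have hne : ¬ (p.2 = pvFm t b) := by omega
      simp [hne]

-- B's actual fold is pvStep over the (index, max) pairs
theorem pv_bfold_map (stores : List (List Int)) (st : Option Int × List Int) :
    (PySem.List.enumerate stores 0).foldl
      (fun (st : Option Int × List Int) is_ =>
        let m := (PySem.List.max? is_.2 (fun y => y)).getD 0
        match st.1 with
        | none => (some m, [is_.1])
        | some b =>
          if m > b then (some m, [is_.1])
          else if m = b then (some b, st.2 ++ [is_.1])
          else st) st
    = ((PySem.List.enumerate stores 0).map (fun is_ => (is_.1, pvMax is_.2))).foldl pvStep st := by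
  rw [List.foldl_map]
  rfl

theorem pv_enum_map {α β : Type} (xs : List α) (f : α → β) (s : Int) :
    (PySem.List.enumerate xs s).map (fun p => (p.1, f p.2))
      = PySem.List.enumerate (xs.map f) s := by
  induction xs generalizing s with
  | nil => simp [PySem.List.enumerate_nil]
  | cons x t ih => simp [PySem.List.enumerate_cons, ih]

-- snd-projection running max over an enumerate is the running max of the list
theorem pv_fm_enum (xs : List Int) (s : Int) (b : Int) :
    pvFm (PySem.List.enumerate xs s) b = xs.foldl max b := by
  have h := PySem.List.map_snd_enumerate (xs := xs) (s := s)
  conv_rhs => rw [← h, List.foldl_map]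
  rfl

-- ===== VERDICT (by name: the statement is the Claim_ definition above) =====
theorem best_store_of_the_week_with_daily_profit_spec : Claim_equal_best_store_of_the_week_with_daily_profit := by
  intro stores _ _
  unfold Spec_best_store_of_the_week_with_daily_profit
  unfold best_store_of_the_week_with_daily_profit best_store_of_the_week_with_daily_profit_alt
  rw [pv_bfold_map, pv_enum_map, pv_build]
  cases stores with
  | nil => simp [PySem.List.enumerate_nil]
  | cons s t =>
    simp only [List.nil_append, List.map]
    have hg : (PySem.List.max? (pvMax s :: t.map pvMax) (fun y => y)).getD 0
        = (t.map pvMax).foldl max (pvMax s) := by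
      rw [PySem.List.max?_id_cons]; rfl
    rw [PySem.List.enumerate_cons]
    have hstep0_gen : pvStep (none, []) ((0:Int), pvMax s) = (some (pvMax s), [(0:Int)]) := rfl
    refine (pv_afold _ _ _).trans ?_
    rw [List.foldl_cons, hstep0_gen, pv_bfold, pv_fm_enum, hg, List.filter_cons]
    set G := (t.map pvMax).foldl max (pvMax s) with hG
    by_cases hEq : pvMax s = G
    · rw [if_pos (by simp [hEq]), if_pos hEq.symm]
      simp
    · have h2 : ¬ G = pvMax s := fun h => hEq h.symm
      rw [if_neg (by simp [hEq])]
      simp [h2]
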